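-- pv_equiv track=rewrite | github.com/AsRumi/LeetCode | 11-20/12.py | maxAreaGreedy
-- ===== SOURCE A (Python) =====
-- def maxAreaGreedy(height: list[int]) -> int:
--     max_height = max(height)
--     biggest_poles = []
--     max_area = 0
--     for p,i in enumerate(height):
--         if(i==max_height):
--             biggest_poles.append((p,i))
--     for biggest_position,biggest_pole in biggest_poles:
--         for position,pole in enumerate(height):
--             area = min(biggest_pole, pole) * abs(biggest_position - position)
--             if(max_area<area):
--                 max_area = area
--     return max_area
-- ===== SOURCE B (Python) =====
-- def maxAreaGreedy(height: list[int]) -> int: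
--     # single pass: only the leftmost/rightmost max-height poles matter
--     m = max(height)
--     left = height.index(m)
--     right = len(height) - 1 - list(reversed(height)).index(m)
--     best = 0
--     for i, h in enumerate(height):
--         best = max(best, h * max(i - left, right - i))
--     return best
-- ===== Notes on version B (the rewrite author's own statement) =====
-- stated objective: faster
-- what changed: Replaces the pass over all max-height poles times a full scan (O(n*k), worst O(n^2)) by computing only the leftmost and rightmost max positions and one single pass with area = h[i]*max(i-left, right-i).
import Mathlib
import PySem

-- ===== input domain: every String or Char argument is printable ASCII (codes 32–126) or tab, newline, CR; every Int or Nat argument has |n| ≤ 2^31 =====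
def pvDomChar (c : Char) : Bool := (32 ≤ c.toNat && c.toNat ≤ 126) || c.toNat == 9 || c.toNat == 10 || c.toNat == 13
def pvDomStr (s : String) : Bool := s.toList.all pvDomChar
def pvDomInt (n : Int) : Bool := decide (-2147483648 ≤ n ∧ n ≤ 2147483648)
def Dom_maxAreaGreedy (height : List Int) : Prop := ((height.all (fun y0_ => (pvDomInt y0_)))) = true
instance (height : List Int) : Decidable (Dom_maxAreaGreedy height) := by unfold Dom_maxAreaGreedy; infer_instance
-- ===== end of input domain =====

-- B replaces A's scan over every max-height pole (O(n·k), worst O(n²)) by a single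
-- pass using only the leftmost and rightmost max positions: area = h[i]·max(i-left, right-i).

-- ===== PORT A =====
def maxAreaGreedy (height : List Int) : Int :=
  match PySem.List.max? height (fun x => x) with
  | none => 0  -- Python's max([]) raises ValueError; excluded by Pre_
  | some maxHeight =>
    let biggestPoles : List (Int × Int) :=
      (PySem.List.enumerate height).foldl
        (fun acc pi => if pi.2 == maxHeight then acc ++ [pi] else acc) []
    biggestPoles.foldl
      (fun maxArea bp =>
        (PySem.List.enumerate height).foldl
          (fun maxArea pi =>
            let area := min bp.2 pi.2 * |bp.1 - pi.1|
            if maxArea < area then area else maxArea)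
          maxArea)
      0

-- ===== PORT B =====
def maxAreaGreedy_alt (height : List Int) : Int :=
  match PySem.List.max? height (fun x => x) with
  | none => 0  -- Python's max([]) raises ValueError; excluded by Pre_
  | some m =>
    match PySem.List.index? height m, PySem.List.index? height.reverse m with
    | some li, some ri =>
      let left : Int := li
      let right : Int := (height.length : Int) - 1 - (ri : Int)
      (PySem.List.enumerate height).foldl
        (fun best pi => max best (pi.2 * max (pi.1 - left) (right - pi.1))) 0
    | _, _ => 0  -- unreachable (totality guard): the maximum is always found by index

-- ===== PRECONDITION & SPEC =====
-- Pre_ excludes only the empty list, on which Python's max (in both A and B) raises ValueError.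
def Pre_maxAreaGreedy (height : List Int) : Prop := height ≠ []
instance (height : List Int) : Decidable (Pre_maxAreaGreedy height) := by
  unfold Pre_maxAreaGreedy; infer_instance
def pvWitness_maxAreaGreedy : List Int := [1, 8, 6, 2, 5, 4, 8, 3, 7]

def Spec_maxAreaGreedy (height : List Int) (out : Int) : Prop := out = maxAreaGreedy_alt height
instance (height : List Int) (out : Int) : Decidable (Spec_maxAreaGreedy height out) := by unfold Spec_maxAreaGreedy; infer_instance

-- ===== CLAIM (what is proved, stated in full; the proofs are below) =====
def Claim_equal_maxAreaGreedy : Prop := ∀ (height : List Int), Dom_maxAreaGreedy height → Pre_maxAreaGreedy height → Spec_maxAreaGreedy height (maxAreaGreedy height)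

-- ===== LEMMAS AND PROOFS =====

theorem pv_ite_max (a b : Int) : (if a < b then b else a) = max a b := by
  by_cases h : a < b
  · rw [if_pos h, max_eq_right h.le]
  · rw [if_neg h, max_eq_left (not_lt.1 h)]

theorem pv_foldl_max_le (l : List Int) (a b : Int) (ha : a ≤ b)
    (h : ∀ x ∈ l, x ≤ b) : l.foldl max a ≤ b := by
  induction l generalizing a with
  | nil => simpa using ha
  | cons x t ih =>
    simp only [List.foldl_cons]
    exact ih _ (max_le ha (h x (by simp))) (fun y hy => h y (by simp [hy]))

theorem pv_foldl_max_flatMap {α : Type} (F : α → List Int) (l : List α) (a : Int) :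
    (l.flatMap F).foldl max a = l.foldl (fun acc x => (F x).foldl max acc) a := by
  induction l generalizing a with
  | nil => simp
  | cons x t ih => simp [List.flatMap_cons, List.foldl_append, ih]

theorem pv_max_dist_nonneg (L R p : Int) (h : L ≤ R) : 0 ≤ max (p - L) (R - p) := by
  rcases le_total p R with h1 | h1
  · exact le_trans (by omega) (le_max_right _ _)
  · exact le_trans (by omega) (le_max_left _ _)

theorem pv_abs_dist_le (L R b p : Int) (h1 : L ≤ b) (h2 : b ≤ R) :
    |b - p| ≤ max (p - L) (R - p) := by
  rcases abs_cases (b - p) with ⟨he, _⟩ | ⟨he, _⟩ <;> rw [he]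
  · exact le_trans (by omega) (le_max_right _ _)
  · exact le_trans (by omega) (le_max_left _ _)

-- the central equality, with the results of max/index already fixed
theorem pv_core (height : List Int) (m : Int) (li ri : Nat)
    (hm : PySem.List.max? height (fun x => x) = some m)
    (hli : PySem.List.index? height m = some li)
    (hri : PySem.List.index? height.reverse m = some ri) :
    ((PySem.List.enumerate height).foldl
        (fun acc pi => if pi.2 == m then acc ++ [pi] else acc) ([] : List (Int × Int))).foldl
      (fun maxArea bp =>
        (PySem.List.enumerate height).foldl
          (fun maxArea pi =>
            let area := min bp.2 pi.2 * |bp.1 - pi.1|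
            if maxArea < area then area else maxArea)
          maxArea)
      0
    = (PySem.List.enumerate height).foldl
        (fun best pi =>
          max best (pi.2 * max (pi.1 - (li : Int)) ((height.length : Int) - 1 - (ri : Int) - pi.1))) 0 := by
  set E := PySem.List.enumerate height with hE
  set L : Int := (li : Int) with hL
  set R : Int := (height.length : Int) - 1 - (ri : Int) with hR
  -- facts about li, ri
  obtain ⟨hlilt, hlieq, hlimin⟩ := PySem.List.getElem_of_index?_eq_some hli
  obtain ⟨hrilt, hrieq, hrimin⟩ := PySem.List.getElem_of_index?_eq_some hri
  have hrilt' : ri < height.length := by simpa using hrilt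
  set Rn : Nat := height.length - 1 - ri with hRn
  have hRval : height[Rn]'(by omega) = m := by
    rw [List.getElem_reverse] at hrieq; simpa using hrieq
  have hRcast : (Rn : Int) = R := by rw [hR, hRn]; omega
  have hLmin : ∀ (k : Nat), (hk : k < height.length) → height[k] = m → li ≤ k := by
    intro k hk hkm
    by_contra hc
    exact hlimin k (by omega) hkm
  have hRmax : ∀ (k : Nat), (hk : k < height.length) → height[k] = m → k ≤ Rn := by
    intro k hk hkm
    by_contra hc
    have hj : height.length - 1 - k < ri := by omega
    apply hrimin _ hj
    rw [List.getElem_reverse]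
    have hkk : height.length - 1 - (height.length - 1 - k) = k := by omega
    simp only [hkk]
    exact hkm
  have hLR : L ≤ R := by
    have := hRmax li hlilt hlieq
    rw [hL, ← hRcast]; exact_mod_cast this
  have hmaxv : ∀ y ∈ height, y ≤ m := by
    have := PySem.List.max?_isMax (key := fun x => x) hm
    simpa using this
  have hmemE : ∀ pi ∈ E, ∃ (k : Nat) (hk : k < height.length), pi = ((k : Int), height[k]) := by
    intro pi hpi
    rw [hE, PySem.List.mem_enumerate_iff] at hpi
    obtain ⟨k, hk, hpe⟩ := hpi
    exact ⟨k, hk, by simpa using hpe⟩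
  have hLE : ((L, m) : Int × Int) ∈ E := by
    rw [hE, PySem.List.mem_enumerate_iff]
    exact ⟨li, hlilt, by simp [hL, hlieq]⟩
  have hRE : ((R, m) : Int × Int) ∈ E := by
    rw [hE, PySem.List.mem_enumerate_iff]
    exact ⟨Rn, by omega, by simp [hRcast, hRval]⟩
  -- rewrite A's first loop as a filter
  rw [PySem.List.foldl_append_if_eq_filter (fun pi => pi.2 == m) E ([] : List (Int × Int))]
  simp only [List.nil_append]
  set BP := E.filter (fun pi => pi.2 == m) with hBP
  -- turn both loops into folds of max over candidate lists
  have hinner : ∀ (bp : Int × Int) (a : Int),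
      E.foldl (fun maxArea pi =>
          let area := min bp.2 pi.2 * |bp.1 - pi.1|
          if maxArea < area then area else maxArea) a
        = (E.map (fun pi => min bp.2 pi.2 * |bp.1 - pi.1|)).foldl max a := by
    intro bp a
    rw [List.foldl_map]
    apply PySem.List.foldl_congr_mem
    intro acc pi _
    exact pv_ite_max acc _
  have hA : BP.foldl
      (fun maxArea bp =>
        E.foldl (fun maxArea pi =>
            let area := min bp.2 pi.2 * |bp.1 - pi.1|
            if maxArea < area then area else maxArea) maxArea) 0
      = (BP.flatMap (fun bp => E.map (fun pi => min bp.2 pi.2 * |bp.1 - pi.1|))).foldl max 0 := by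
    rw [pv_foldl_max_flatMap]
    apply PySem.List.foldl_congr_mem
    intro acc bp _
    exact hinner bp acc
  have hB : E.foldl (fun best pi => max best (pi.2 * max (pi.1 - L) (R - pi.1))) 0
      = (E.map (fun pi => pi.2 * max (pi.1 - L) (R - pi.1))).foldl max 0 := by
    rw [List.foldl_map]
  rw [hA, hB]
  set candsA := BP.flatMap (fun bp => E.map (fun pi => min bp.2 pi.2 * |bp.1 - pi.1|)) with hcA
  set candsB := E.map (fun pi => pi.2 * max (pi.1 - L) (R - pi.1)) with hcB
  have hA0 : (0 : Int) ≤ candsA.foldl max 0 := (PySem.List.le_foldl_max candsA 0).1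
  have hB0 : (0 : Int) ≤ candsB.foldl max 0 := (PySem.List.le_foldl_max candsB 0).1
  -- membership facts about BP
  have hBPmem : ∀ bp ∈ BP, bp ∈ E ∧ bp.2 = m := by
    intro bp hbp
    rw [hBP, List.mem_filter] at hbp
    exact ⟨hbp.1, by simpa using hbp.2⟩
  have hBPL : ((L, m) : Int × Int) ∈ BP := by
    rw [hBP, List.mem_filter]; exact ⟨hLE, by simp⟩
  have hBPR : ((R, m) : Int × Int) ∈ BP := by
    rw [hBP, List.mem_filter]; exact ⟨hRE, by simp⟩
  apply le_antisymm
  · -- every A candidate is bounded by B's fold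
    apply pv_foldl_max_le _ _ _ hB0
    intro x hx
    rw [hcA, List.mem_flatMap] at hx
    obtain ⟨bp, hbp, hx⟩ := hx
    rw [List.mem_map] at hx
    obtain ⟨pi, hpi, rfl⟩ := hx
    obtain ⟨hbpE, hbp2⟩ := hBPmem bp hbp
    obtain ⟨k, hk, rfl⟩ := hmemE bp hbpE
    obtain ⟨q, hq, rfl⟩ := hmemE pi hpi
    dsimp only at hbp2 ⊢
    have hk2 : height[k] = m := hbp2
    have hbpL : L ≤ (k : Int) := by
      rw [hL]; exact_mod_cast hLmin k hk hk2
    have hbpR : (k : Int) ≤ R := by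
      rw [← hRcast]; exact_mod_cast hRmax k hk hk2
    have hmin : min height[k] height[q] = height[q] := by
      rw [hk2]
      exact min_eq_right (hmaxv _ (height.getElem_mem hq))
    rw [hmin]
    rcases le_total 0 height[q] with hs | hs
    · have h1 : height[q] * |(k : Int) - (q : Int)| ≤ height[q] * max ((q : Int) - L) (R - (q : Int)) :=
        mul_le_mul_of_nonneg_left (pv_abs_dist_le L R _ _ hbpL hbpR) hs
      refine le_trans h1 ((PySem.List.le_foldl_max candsB 0).2 _ ?_)
      rw [hcB, List.mem_map]
      exact ⟨((q : Int), height[q]), hpi, rfl⟩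
    · have h1 : height[q] * |(k : Int) - (q : Int)| ≤ 0 :=
        mul_nonpos_iff.2 (Or.inr ⟨hs, abs_nonneg _⟩)
      exact le_trans h1 hB0
  · -- every B candidate is bounded by A's fold
    apply pv_foldl_max_le _ _ _ hA0
    intro y hy
    rw [hcB, List.mem_map] at hy
    obtain ⟨pi, hpi, rfl⟩ := hy
    obtain ⟨q, hq, rfl⟩ := hmemE pi hpi
    dsimp only at *
    have h0 : 0 ≤ max ((q : Int) - L) (R - (q : Int)) := pv_max_dist_nonneg L R _ hLR
    have hqm : height[q] ≤ m := hmaxv _ (height.getElem_mem hq)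
    rcases le_total 0 height[q] with hs | hs
    · rcases max_choice ((q : Int) - L) (R - (q : Int)) with hc | hc
      · -- the far pole is the leftmost max pole
        have habs : |L - (q : Int)| = (q : Int) - L := by
          rw [hc] at h0; rw [abs_of_nonpos (by omega)]; ring
        have heq : height[q] * max ((q : Int) - L) (R - (q : Int)) = min m height[q] * |L - (q : Int)| := by
          rw [hc, habs, min_eq_right hqm]
        rw [heq]
        apply (PySem.List.le_foldl_max candsA 0).2
        rw [hcA, List.mem_flatMap]
        exact ⟨(L, m), hBPL, by rw [List.mem_map]; exact ⟨((q : Int), height[q]), hpi, rfl⟩⟩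
      · -- the far pole is the rightmost max pole
        have habs : |R - (q : Int)| = R - (q : Int) := by rw [hc] at h0; exact abs_of_nonneg h0
        have heq : height[q] * max ((q : Int) - L) (R - (q : Int)) = min m height[q] * |R - (q : Int)| := by
          rw [hc, habs, min_eq_right hqm]
        rw [heq]
        apply (PySem.List.le_foldl_max candsA 0).2
        rw [hcA, List.mem_flatMap]
        exact ⟨(R, m), hBPR, by rw [List.mem_map]; exact ⟨((q : Int), height[q]), hpi, rfl⟩⟩
    · have h1 : height[q] * max ((q : Int) - L) (R - (q : Int)) ≤ 0 :=
        mul_nonpos_iff.2 (Or.inr ⟨hs, h0⟩)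
      exact le_trans h1 hA0

-- ===== VERDICT (by name: the statement is the Claim_ definition above) =====
theorem maxAreaGreedy_spec : Claim_equal_maxAreaGreedy := by
  intro height _ hpre
  unfold Spec_maxAreaGreedy maxAreaGreedy maxAreaGreedy_alt
  obtain ⟨m, hm⟩ : ∃ m, PySem.List.max? height (fun x => x) = some m := by
    cases hmm : PySem.List.max? height (fun x => x) with
    | none => exact absurd ((PySem.List.max?_eq_none_iff _ _).1 hmm) hpre
    | some m => exact ⟨m, rfl⟩
  have hmem : m ∈ height := PySem.List.max?_mem hm
  obtain ⟨li, hli⟩ : ∃ li, PySem.List.index? height m = some li := by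
    have := (PySem.List.index?_isSome_iff height m).2 hmem
    exact Option.isSome_iff_exists.1 this
  obtain ⟨ri, hri⟩ : ∃ ri, PySem.List.index? height.reverse m = some ri := by
    have := (PySem.List.index?_isSome_iff height.reverse m).2 (List.mem_reverse.2 hmem)
    exact Option.isSome_iff_exists.1 this
  simp only [hm, hli, hri]
  exact pv_core height m li ri hm hli hri
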